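-- pv_equiv track=rewrite | github.com/Digital-AI-Finance/neural-networks | extend_topic_pdfs.py | parse_practice_problems
-- ===== SOURCE A (Python) =====
-- def parse_practice_problems(content):
--     """Parse practice problems section into individual problems."""
--     problems = []
--     current_problem = {'question': '', 'solution': ''}
--     in_solution = False
--
--     for line in content.split('\n'):
--         if line.startswith('### Problem'):
--             if current_problem['question']:
--                 problems.append(current_problem)
--             current_problem = {'question': '', 'solution': '', 'title': line[4:].strip()}
--             in_solution = False
--         elif '<details>' in line or '<summary>' in line or '</summary>' in line or '</details>' in line:
--             in_solution = '<details>' in line or in_solution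
--             continue
--         elif in_solution:
--             current_problem['solution'] += line + '\n'
--         else:
--             current_problem['question'] += line + '\n'
--
--     if current_problem['question']:
--         problems.append(current_problem)
--
--     return problems
-- ===== SOURCE B (Python) =====
-- def parse_practice_problems(content):
--     """Parse practice problems section into individual problems."""
--     lines = content.split('\n')
--     # group lines into chunks: (header_line_or_None, body_lines)
--     chunks = []
--     cur = (None, [])
--     for line in lines:
--         if line.startswith('### Problem'):
--             chunks.append(cur)
--             cur = (line, [])
--         else:
--             cur[1].append(line)
--     chunks.append(cur)
--
--     problems = []
--     for header, body in chunks: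
--         q_parts, s_parts = [], []
--         in_solution = False
--         for line in body:
--             if ('<details>' in line or '<summary>' in line
--                     or '</summary>' in line or '</details>' in line):
--                 if '<details>' in line:
--                     in_solution = True
--                 continue
--             (s_parts if in_solution else q_parts).append(line + '\n')
--         question = ''.join(q_parts)
--         if question:
--             problem = {'question': question, 'solution': ''.join(s_parts)}
--             if header is not None:
--                 problem['title'] = header[4:].strip()
--             problems.append(problem)
--     return problems
-- ===== Notes on version B (the rewrite author's own statement) =====
-- stated objective: alternative
-- what changed: A runs one stateful loop mutating a current-problem dict with an in_solution flag carried across lines; B first splits the lines into header-delimited chunks (a title-less leading chunk plus one chunk per '### Problem' header) and then renders each chunk independently by accumulating question/solution part lists and joining them.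
import Mathlib
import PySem

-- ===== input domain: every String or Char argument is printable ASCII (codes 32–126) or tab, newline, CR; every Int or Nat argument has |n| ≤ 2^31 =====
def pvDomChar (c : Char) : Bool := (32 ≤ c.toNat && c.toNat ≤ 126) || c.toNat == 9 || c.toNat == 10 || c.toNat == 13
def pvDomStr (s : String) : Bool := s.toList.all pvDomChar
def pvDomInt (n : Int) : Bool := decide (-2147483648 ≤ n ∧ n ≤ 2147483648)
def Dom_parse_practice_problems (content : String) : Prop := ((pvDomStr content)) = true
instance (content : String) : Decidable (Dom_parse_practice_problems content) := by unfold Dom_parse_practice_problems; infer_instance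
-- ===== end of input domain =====

-- B regroups A's single stateful loop into two phases (split the lines into header-delimited
-- chunks, then render each chunk independently); objective: alternative decomposition, same cost.

-- ===== PORT A =====
-- A-side helpers: the tag test and the title extraction, as in A's source
def ppIsTag (line : String) : Bool :=
  PySem.Str.isIn "<details>" line || PySem.Str.isIn "<summary>" line ||
  PySem.Str.isIn "</summary>" line || PySem.Str.isIn "</details>" line

def ppTitle (line : String) : String :=
  PySem.Str.strip (PySem.Str.slice line (some 4) none)

-- one iteration of A's for-loop; state = (problems, current_problem, in_solution)
def ppStepA (st : List (List (String × String)) × PySem.Dict String String × Bool)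
    (line : String) : List (List (String × String)) × PySem.Dict String String × Bool :=
  let (problems, cur, inSol) := st
  if PySem.Str.startswith line "### Problem" then
    let problems := if cur.getD "question" "" ≠ "" then problems ++ [cur.items] else problems
    (problems, PySem.Dict.ofList [("question", ""), ("solution", ""), ("title", ppTitle line)], false)
  else if ppIsTag line then
    (problems, cur, PySem.Str.isIn "<details>" line || inSol)
  else if inSol then
    (problems, cur.insert "solution" (cur.getD "solution" "" ++ line ++ "\n"), inSol)
  else
    (problems, cur.insert "question" (cur.getD "question" "" ++ line ++ "\n"), inSol)

def parse_practice_problems (content : String) : List (List (String × String)) :=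
  let st := ((PySem.Str.split? content "\n").getD []).foldl ppStepA
      ([], PySem.Dict.ofList [("question", ""), ("solution", "")], false)
  if st.2.1.getD "question" "" ≠ "" then st.1 ++ [st.2.1.items] else st.1

-- ===== PORT B =====
-- B-side helpers, following Source B: chunking pass, then per-chunk rendering
def altIsTag (line : String) : Bool :=
  PySem.Str.isIn "<details>" line || PySem.Str.isIn "<summary>" line ||
  PySem.Str.isIn "</summary>" line || PySem.Str.isIn "</details>" line

-- phase 1: group the lines into (optional header, body) chunks
def altChunkStep (st : List (Option String × List String) × (Option String × List String))
    (line : String) : List (Option String × List String) × (Option String × List String) :=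
  if PySem.Str.startswith line "### Problem" then (st.1 ++ [st.2], (some line, []))
  else (st.1, (st.2.1, st.2.2 ++ [line]))

def altChunks (lines : List String) : List (Option String × List String) :=
  let st := lines.foldl altChunkStep ([], (none, []))
  st.1 ++ [st.2]

-- phase 2: render one chunk; state = (question parts, solution parts, in_solution)
def altBodyStep (st : List String × List String × Bool) (line : String) :
    List String × List String × Bool :=
  if altIsTag line then
    (st.1, st.2.1, PySem.Str.isIn "<details>" line || st.2.2)
  else if st.2.2 then (st.1, st.2.1 ++ [line ++ "\n"], st.2.2)
  else (st.1 ++ [line ++ "\n"], st.2.1, st.2.2)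

def altProblem (chunk : Option String × List String) : String × List (String × String) :=
  let parts := chunk.2.foldl altBodyStep ([], [], false)
  let q := PySem.Str.join "" parts.1
  let d : PySem.Dict String String :=
    PySem.Dict.ofList [("question", q), ("solution", PySem.Str.join "" parts.2.1)]
  let d := match chunk.1 with
    | some h => d.insert "title" (PySem.Str.strip (PySem.Str.slice h (some 4) none))
    | none => d
  (q, d.items)

def altEmitStep (acc : List (List (String × String))) (chunk : Option String × List String) :
    List (List (String × String)) :=
  let p := altProblem chunk
  if p.1 ≠ "" then acc ++ [p.2] else acc

def parse_practice_problems_alt (content : String) : List (List (String × String)) :=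
  (altChunks ((PySem.Str.split? content "\n").getD [])).foldl altEmitStep []

-- ===== PRECONDITION & SPEC =====
def Spec_parse_practice_problems (content : String) (out : List (List (String × String))) : Prop := out = parse_practice_problems_alt content
instance (content : String) (out : List (List (String × String))) : Decidable (Spec_parse_practice_problems content out) := by unfold Spec_parse_practice_problems; infer_instance

-- ===== CLAIM (what is proved, stated in full; the proofs are below) =====
def Claim_equal_parse_practice_problems : Prop := ∀ (content : String), Dom_parse_practice_problems content → Spec_parse_practice_problems content (parse_practice_problems content)

-- ===== LEMMAS AND PROOFS =====

-- the shape A's current_problem dict always has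
def mkCur (q s : String) (t? : Option String) : PySem.Dict String String :=
  match t? with
  | none => PySem.Dict.ofList [("question", q), ("solution", s)]
  | some t => PySem.Dict.ofList [("question", q), ("solution", s), ("title", t)]

theorem getD_mkCur_q (q s : String) (t? : Option String) :
    (mkCur q s t?).getD "question" "" = q := by
  cases t? <;> simp [mkCur, PySem.Dict.ofList, PySem.Dict.getD, PySem.Dict.get?,
    PySem.Dict.update, PySem.Dict.insert, PySem.Dict.empty, PySem.Dict.contains]

theorem getD_mkCur_s (q s : String) (t? : Option String) :
    (mkCur q s t?).getD "solution" "" = s := by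
  cases t? <;> simp [mkCur, PySem.Dict.ofList, PySem.Dict.getD, PySem.Dict.get?,
    PySem.Dict.update, PySem.Dict.insert, PySem.Dict.empty, PySem.Dict.contains]

theorem insert_mkCur_s (q s v : String) (t? : Option String) :
    (mkCur q s t?).insert "solution" v = mkCur q v t? := by
  cases t? <;> simp [mkCur, PySem.Dict.ofList, PySem.Dict.update,
    PySem.Dict.insert, PySem.Dict.empty, PySem.Dict.contains]

theorem insert_mkCur_q (q s v : String) (t? : Option String) :
    (mkCur q s t?).insert "question" v = mkCur v s t? := by
  cases t? <;> simp [mkCur, PySem.Dict.ofList, PySem.Dict.update,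
    PySem.Dict.insert, PySem.Dict.empty, PySem.Dict.contains]

theorem insert_title (q s t : String) :
    (PySem.Dict.ofList [("question", q), ("solution", s)] : PySem.Dict String String).insert
      "title" t = mkCur q s (some t) := by
  simp [mkCur, PySem.Dict.ofList, PySem.Dict.update,
    PySem.Dict.insert, PySem.Dict.empty, PySem.Dict.contains]

-- reference rendering of the remaining lines from a mid-chunk state
def emitChunk (q s : String) (t? : Option String) (f : Bool) :
    List String → List (List (String × String))
  | [] => if q ≠ "" then [(mkCur q s t?).items] else []
  | l :: rest =>
    if PySem.Str.startswith l "### Problem" then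
      (if q ≠ "" then [(mkCur q s t?).items] else []) ++
        emitChunk "" "" (some (ppTitle l)) false rest
    else if ppIsTag l then emitChunk q s t? (PySem.Str.isIn "<details>" l || f) rest
    else if f then emitChunk q (s ++ l ++ "\n") t? f rest
    else emitChunk (q ++ l ++ "\n") s t? f rest

theorem A_emit (lines : List String) : ∀ (probs : List (List (String × String)))
    (q s : String) (t? : Option String) (f : Bool),
    (let st := lines.foldl ppStepA (probs, mkCur q s t?, f);
     if st.2.1.getD "question" "" ≠ "" then st.1 ++ [st.2.1.items] else st.1)
      = probs ++ emitChunk q s t? f lines := by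
  induction lines with
  | nil =>
    intro probs q s t? f
    simp only [List.foldl_nil, emitChunk, getD_mkCur_q]
    split_ifs <;> simp
  | cons l rest ih =>
    intro probs q s t? f
    simp only [List.foldl_cons, emitChunk, ppStepA]
    by_cases h1 : PySem.Str.startswith l "### Problem"
    · simp only [h1, if_true, getD_mkCur_q]
      have : (PySem.Dict.ofList [("question", ""), ("solution", ""), ("title", ppTitle l)] :
          PySem.Dict String String) = mkCur "" "" (some (ppTitle l)) := rfl
      rw [this, ih]
      split_ifs <;> simp
    · simp only [h1]
      by_cases h2 : ppIsTag l
      · simp [h2, ih]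
      · by_cases h3 : f
        · simp [h2, h3, getD_mkCur_s, insert_mkCur_s, ih]
        · simp [h2, h3, getD_mkCur_q, insert_mkCur_q, ih]

-- B phase 1 equals a structural chunking
def chunksRec : List String → (Option String × List String) → List (Option String × List String)
  | [], cur => [cur]
  | l :: rest, cur =>
    if PySem.Str.startswith l "### Problem" then cur :: chunksRec rest (some l, [])
    else chunksRec rest (cur.1, cur.2 ++ [l])

theorem chunks_fold (lines : List String) : ∀ (done : List (Option String × List String))
    (cur : Option String × List String),
    (lines.foldl altChunkStep (done, cur)).1 ++ [(lines.foldl altChunkStep (done, cur)).2]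
      = done ++ chunksRec lines cur := by
  induction lines with
  | nil => intro done cur; simp [chunksRec]
  | cons l rest ih =>
    intro done cur
    simp only [List.foldl_cons, altChunkStep, chunksRec]
    by_cases h : PySem.Str.startswith l "### Problem"
    · simp only [h, if_true]
      rw [ih (done ++ [cur]) (some l, [])]
      simp
    · simp only [h]
      exact ih done (cur.1, cur.2 ++ [l])

-- string-level body accumulator (what A's dict fields do on a header-free run)
def accStep (r : String × String × Bool) (l : String) : String × String × Bool :=
  if ppIsTag l then (r.1, r.2.1, PySem.Str.isIn "<details>" l || r.2.2)
  else if r.2.2 then (r.1, r.2.1 ++ l ++ "\n", r.2.2)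
  else (r.1 ++ l ++ "\n", r.2.1, r.2.2)

def bodyAcc (body : List String) (q s : String) (f : Bool) : String × String × Bool :=
  body.foldl accStep (q, s, f)

theorem join_nil_flatten (cs : List (List Char)) : List.intercalate [] cs = cs.flatten := by
  induction cs with
  | nil => rfl
  | cons h t ih => cases t <;> simp_all [List.intercalate]

theorem join_snoc (l : List String) (x : String) :
    PySem.Str.join "" (l ++ [x]) = PySem.Str.join "" l ++ x := by
  simp [PySem.Str.join, PySem.Chars.join, join_nil_flatten, String.ofList_append]

theorem body_fold (body : List String) : ∀ (qp sp : List String) (f : Bool),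
    (PySem.Str.join "" (body.foldl altBodyStep (qp, sp, f)).1,
     PySem.Str.join "" (body.foldl altBodyStep (qp, sp, f)).2.1,
     (body.foldl altBodyStep (qp, sp, f)).2.2)
      = bodyAcc body (PySem.Str.join "" qp) (PySem.Str.join "" sp) f := by
  induction body with
  | nil => intro qp sp f; simp [bodyAcc]
  | cons l rest ih =>
    intro qp sp f
    simp only [List.foldl_cons, altBodyStep, bodyAcc, accStep]
    by_cases h1 : altIsTag l
    · simpa [h1, bodyAcc, show ppIsTag l = altIsTag l from rfl] using ih qp sp _
    · by_cases h2 : f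
      · simpa [h1, h2, bodyAcc, join_snoc, String.append_assoc,
            show ppIsTag l = altIsTag l from rfl] using ih qp (sp ++ [l ++ "\n"]) f
      · simpa [h1, h2, bodyAcc, join_snoc, String.append_assoc,
            show ppIsTag l = altIsTag l from rfl] using ih (qp ++ [l ++ "\n"]) sp f

theorem altProblem_eq (h? : Option String) (body : List String) :
    altProblem (h?, body) =
      ((bodyAcc body "" "" false).1,
       (mkCur (bodyAcc body "" "" false).1 (bodyAcc body "" "" false).2.1
         (h?.map ppTitle)).items) := by
  have hnil : PySem.Str.join "" ([] : List String) = "" := rfl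
  have hb := body_fold body [] [] false
  rw [hnil] at hb
  have h1 : PySem.Str.join "" (body.foldl altBodyStep ([], [], false)).1
      = (bodyAcc body "" "" false).1 := congrArg Prod.fst hb
  have h2 : PySem.Str.join "" (body.foldl altBodyStep ([], [], false)).2.1
      = (bodyAcc body "" "" false).2.1 := congrArg (fun r => r.2.1) hb
  cases h? with
  | none => simp only [altProblem, Option.map_none, mkCur, h1, h2]
  | some h => simp only [altProblem, Option.map_some, h1, h2, insert_title, ppTitle]

theorem bodyAcc_snoc (body : List String) (q s : String) (f : Bool) (l : String) :
    bodyAcc (body ++ [l]) q s f = accStep (bodyAcc body q s f) l := by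
  simp [bodyAcc]

theorem B_emit (lines : List String) : ∀ (h? : Option String) (body : List String)
    (acc : List (List (String × String))),
    (chunksRec lines (h?, body)).foldl altEmitStep acc
      = acc ++ emitChunk (bodyAcc body "" "" false).1 (bodyAcc body "" "" false).2.1
          (h?.map ppTitle) (bodyAcc body "" "" false).2.2 lines := by
  induction lines with
  | nil =>
    intro h? body acc
    simp only [chunksRec, List.foldl_cons, List.foldl_nil, altEmitStep, altProblem_eq, emitChunk]
    split_ifs <;> simp
  | cons l rest ih =>
    intro h? body acc
    simp only [chunksRec, emitChunk]
    by_cases h1 : PySem.Str.startswith l "### Problem"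
    · simp only [h1, if_true, List.foldl_cons, altEmitStep, altProblem_eq]
      rw [ih (some l) [] _]
      have : bodyAcc [] "" "" false = ("", "", false) := rfl
      rw [this]
      split_ifs <;> simp [ppTitle]
    · simp only [h1, Bool.false_eq_true, if_false]
      rw [ih h? (body ++ [l]) acc, bodyAcc_snoc]
      simp only [accStep]
      by_cases h2 : ppIsTag l
      · simp [h2]
      · by_cases h3 : (bodyAcc body "" "" false).2.2
        · simp [h2, h3]
        · simp [h2, h3]

-- ===== VERDICT (by name: the statement is the Claim_ definition above) =====
theorem parse_practice_problems_spec : Claim_equal_parse_practice_problems := by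
  unfold Claim_equal_parse_practice_problems
  intro content _
  unfold Spec_parse_practice_problems parse_practice_problems parse_practice_problems_alt altChunks
  have hA := A_emit ((PySem.Str.split? content "\n").getD []) [] "" "" none false
  have hC := chunks_fold ((PySem.Str.split? content "\n").getD []) [] (none, [])
  have hB := B_emit ((PySem.Str.split? content "\n").getD []) none [] []
  simp only [List.nil_append] at hA hC hB
  dsimp only at hA ⊢
  rw [show (PySem.Dict.ofList [("question", ""), ("solution", "")] : PySem.Dict String String)
      = mkCur "" "" none from rfl]
  rw [hA, hC, hB]
  rfl
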